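-- pv_equiv track=rewrite | github.com/erictran418/DatabaseManagement-Python | Excel&CSV. DataCleaning&Analysis/tfidf.py | inDoc
-- ===== SOURCE A (Python) =====
-- def inDoc(list, term):
--     count = 0
--     for entry in list:
--         for a in entry.split(" "):
--             if term in a:
--                 count += 1
--                 break
--     return count
-- ===== SOURCE B (Python) =====
-- def inDoc(list, term):
--     if " " in term:
--         return 0
--     return sum(1 for entry in list if term in entry)
-- ===== Notes on version B (the rewrite author's own statement) =====
-- stated objective: simpler
-- what changed: A splits every entry into words and scans them with a break; B notes that a space-free term occurs in a space-delimited word iff it occurs in the whole entry (and a term containing a space never occurs in a word), so it replaces the nested split-and-scan loop by one whole-string membership test per entry.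
import Mathlib
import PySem

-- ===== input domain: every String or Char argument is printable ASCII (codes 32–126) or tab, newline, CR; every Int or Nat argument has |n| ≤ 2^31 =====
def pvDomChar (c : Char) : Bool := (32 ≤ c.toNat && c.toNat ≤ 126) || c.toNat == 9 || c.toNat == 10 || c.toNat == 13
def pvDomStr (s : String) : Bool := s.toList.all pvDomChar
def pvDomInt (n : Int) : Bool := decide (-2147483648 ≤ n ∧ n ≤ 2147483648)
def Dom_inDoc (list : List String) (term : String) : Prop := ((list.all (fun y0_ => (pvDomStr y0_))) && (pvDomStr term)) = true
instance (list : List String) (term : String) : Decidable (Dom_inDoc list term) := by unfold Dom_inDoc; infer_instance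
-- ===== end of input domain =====

-- B replaces A's per-word inner loop (split on " ", scan, break) by a single
-- whole-entry substring test guarded by "does term contain a space"; objective: simpler.

-- ===== PORT A =====
-- A's inner loop over entry.split(" "): count += 1 and break at the first word containing term
def inDocInner (term : String) : List String → Int
  | [] => 0
  | a :: rest => if PySem.Str.isIn term a then 1 else inDocInner term rest

def inDoc (list : List String) (term : String) : Int :=
  list.foldl (fun count entry => count + inDocInner term ((PySem.Str.split? entry " ").getD [])) 0

-- ===== PORT B =====
def inDoc_alt (list : List String) (term : String) : Int :=
  if PySem.Str.isIn " " term then 0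
  else ((list.filter (fun entry => PySem.Str.isIn term entry)).length : Int)

-- ===== PRECONDITION & SPEC =====
def Spec_inDoc (list : List String) (term : String) (out : Int) : Prop := out = inDoc_alt list term
instance (list : List String) (term : String) (out : Int) : Decidable (Spec_inDoc list term out) := by unfold Spec_inDoc; infer_instance

-- ===== CLAIM (what is proved, stated in full; the proofs are below) =====
def Claim_equal_inDoc : Prop := ∀ (list : List String) (term : String), Dom_inDoc list term → Spec_inDoc list term (inDoc list term)

-- ===== LEMMAS AND PROOFS =====

-- structural reformulation of Python's split(" ") (single-space separator); `pre` is the word under construction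
def mySplit (pre : List Char) : List Char → List (List Char)
  | [] => [pre]
  | c :: rest => if c = ' ' then pre :: mySplit [] rest else mySplit (pre ++ [c]) rest

lemma go_eq_mySplit : ∀ (l : List Char) (fuel : Nat) (cur : List Char) (acc : List (List Char)),
    l.length ≤ fuel →
    PySem.Chars.splitOn.go [' '] fuel l cur acc = acc.reverse ++ mySplit cur.reverse l := by
  intro l
  induction l with
  | nil =>
    intro fuel cur acc _
    cases fuel <;> simp [PySem.Chars.splitOn.go, mySplit]
  | cons c rest ih =>
    intro fuel cur acc h
    cases fuel with
    | zero => simp at h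
    | succ f =>
      by_cases hc : c = ' '
      · subst hc
        rw [PySem.Chars.splitOn.go]
        simp [List.isPrefixOf, mySplit, ih _ _ _ (by simpa using Nat.le_of_succ_le_succ h)]
      · rw [PySem.Chars.splitOn.go]
        simp [List.isPrefixOf, hc, Ne.symm hc, mySplit, ih _ _ _ (by simpa using Nat.le_of_succ_le_succ h)]

lemma splitOn_space_eq_mySplit (cs : List Char) :
    PySem.Chars.splitOn cs [' '] = mySplit [] cs := by
  unfold PySem.Chars.splitOn
  rw [go_eq_mySplit cs (cs.length + 1) [] [] (Nat.le_succ _)]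
  simp

lemma mem_mySplit_no_space : ∀ (cs : List Char) (pre w : List Char), ' ' ∉ pre →
    w ∈ mySplit pre cs → ' ' ∉ w := by
  intro cs
  induction cs with
  | nil => intro pre w hp hw; simp [mySplit] at hw; subst hw; exact hp
  | cons c rest ih =>
    intro pre w hp hw
    by_cases hc : c = ' '
    · subst hc; simp [mySplit] at hw
      rcases hw with h | h
      · subst h; exact hp
      · exact ih [] w (by simp) h
    · simp [mySplit, hc] at hw
      exact ih _ w (by simp [hp, Ne.symm hc]) hw

lemma infix_append_cons {c : Char} (t y z : List Char) (hc : c ∉ t) :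
    t <:+: y ++ c :: z ↔ t <:+: y ∨ t <:+: z := by
  constructor
  · rintro ⟨s1, s2, he⟩
    rw [List.append_assoc] at he
    rcases List.append_eq_append_iff.mp he with ⟨a', hy, ha⟩ | ⟨d, hs1, hd⟩
    · rcases List.append_eq_append_iff.mp ha with ⟨b, hab, _⟩ | ⟨b, htb, hbz⟩
      · exact Or.inl (List.IsPrefix.isInfix ⟨b, hab.symm⟩ |>.trans ⟨s1, [], by simp [hy]⟩)
      · cases b with
        | nil => simp at htb; exact Or.inl (⟨s1, [], by simp [hy, htb]⟩)
        | cons b0 b' =>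
          rcases List.cons_eq_cons.mp hbz.symm with ⟨hb0, _⟩
          exact absurd (htb ▸ List.mem_append_right a' (hb0 ▸ List.mem_cons_self)) hc
    · cases d with
      | nil =>
        simp at hd
        cases t with
        | nil => exact Or.inl List.nil_infix
        | cons t0 t' =>
          rcases List.cons_eq_cons.mp hd with ⟨h1, _⟩
          exact absurd (h1 ▸ List.mem_cons_self) hc
      | cons d0 d' =>
        rcases List.cons_eq_cons.mp hd with ⟨_, h2⟩
        exact Or.inr ⟨d', s2, by simpa [List.append_assoc] using h2.symm⟩
  · rintro (h | h)
    · exact h.trans (List.prefix_append _ _).isInfix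
    · exact h.trans (((List.suffix_cons c z).trans (List.suffix_append y (c :: z))).isInfix)

lemma mySplit_any_iff (t : List Char) (ht : ' ' ∉ t) :
    ∀ (cs pre : List Char),
      ((mySplit pre cs).any (fun w => PySem.Chars.isIn t w)) = true ↔ t <:+: (pre ++ cs) := by
  intro cs
  induction cs with
  | nil =>
    intro pre
    simp [mySplit, PySem.Chars.isIn_iff_infix]
  | cons c rest ih =>
    intro pre
    by_cases hc : c = ' '
    · subst hc
      simp only [mySplit, if_pos]
      rw [infix_append_cons t pre rest ht]
      simp [PySem.Chars.isIn_iff_infix, ih []]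
    · simp only [mySplit, if_neg hc]
      rw [ih (pre ++ [c])]
      simp

lemma mySplit_any_false (t : List Char) (ht : ' ' ∈ t) (cs : List Char) :
    ((mySplit [] cs).any (fun w => PySem.Chars.isIn t w)) = false := by
  rw [List.any_eq_false]
  intro w hw
  simp only [PySem.Chars.isIn_iff_infix] at *
  intro hinf
  exact mem_mySplit_no_space cs [] w (by simp) hw (hinf.subset ht)

lemma inDocInner_eq_any (term : String) : ∀ (ws : List String),
    inDocInner term ws = if ws.any (fun a => PySem.Str.isIn term a) then 1 else 0 := by
  intro ws
  induction ws with
  | nil => simp [inDocInner]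
  | cons a rest ih =>
    rw [inDocInner, ih, List.any_cons]
    by_cases h : PySem.Str.isIn term a = true
    · rw [if_pos h, h, Bool.true_or, if_pos rfl]
    · have hf : PySem.Str.isIn term a = false := Bool.eq_false_iff.mpr h
      rw [if_neg h, hf, Bool.false_or]

lemma singleton_infix_iff {c : Char} {l : List Char} : [c] <:+: l ↔ c ∈ l := by
  constructor
  · intro h; exact h.subset List.mem_cons_self
  · intro h
    rcases List.append_of_mem h with ⟨s, u, rfl⟩
    exact ⟨s, u, by simp⟩

-- A's per-entry contribution equals B's per-entry test
lemma entry_contrib (term entry : String) :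
    inDocInner term ((PySem.Str.split? entry " ").getD []) =
      if PySem.Str.isIn " " term then 0
      else (if PySem.Str.isIn term entry then 1 else 0) := by
  have hsplit : (PySem.Str.split? entry " ").getD []
      = (mySplit [] entry.toList).map String.ofList := by
    show (Option.map (List.map String.ofList)
        (PySem.Chars.split? entry.toList (" ".toList))).getD []
      = List.map String.ofList (mySplit [] entry.toList)
    rw [PySem.Chars.split?, if_neg (by decide),
      show (" " : String).toList = [' '] from rfl, splitOn_space_eq_mySplit]
    rfl
  rw [inDocInner_eq_any, hsplit]
  have hany : ((mySplit [] entry.toList).map String.ofList).any (fun a => PySem.Str.isIn term a)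
      = (mySplit [] entry.toList).any (fun w => PySem.Chars.isIn term.toList w) := by
    rw [List.any_map]
    simp [Function.comp_def, PySem.Str.isIn]
  rw [hany]
  by_cases hsp : PySem.Str.isIn " " term
  · have hmem : ' ' ∈ term.toList := by
      have := (PySem.Str.isIn_iff_infix " " term).mp hsp
      simpa using singleton_infix_iff.mp (by simpa using this)
    rw [mySplit_any_false term.toList hmem, if_pos hsp, if_neg Bool.false_ne_true]
  · have hnm : ' ' ∉ term.toList := by
      intro hmem
      exact hsp ((PySem.Str.isIn_iff_infix " " term).mpr (by simpa using singleton_infix_iff.mpr hmem))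
    by_cases hin : PySem.Str.isIn term entry = true
    · have hT : ((mySplit [] entry.toList).any fun w => PySem.Chars.isIn term.toList w) = true :=
        (mySplit_any_iff term.toList hnm entry.toList []).mpr
          (by simpa using (PySem.Str.isIn_iff_infix term entry).mp hin)
      rw [hT, if_pos rfl, if_neg hsp, if_pos hin]
    · have hF : ((mySplit [] entry.toList).any fun w => PySem.Chars.isIn term.toList w) = false := by
        rw [Bool.eq_false_iff]
        intro hT
        exact hin ((PySem.Str.isIn_iff_infix term entry).mpr
          (by simpa using (mySplit_any_iff term.toList hnm entry.toList []).mp hT))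
      rw [hF, if_neg Bool.false_ne_true, if_neg hsp, if_neg hin]

lemma foldl_count (p : String → Bool) : ∀ (l : List String) (acc : Int),
    l.foldl (fun c e => c + (if p e then 1 else 0)) acc = acc + ((l.filter p).length : Int) := by
  intro l
  induction l with
  | nil => simp
  | cons e rest ih =>
    intro acc
    by_cases h : p e
    · simp [h, ih]; ring
    · simp [h, ih]

-- ===== VERDICT (by name: the statement is the Claim_ definition above) =====
theorem inDoc_spec : Claim_equal_inDoc := by
  intro list term _
  unfold Spec_inDoc inDoc inDoc_alt
  by_cases hsp : PySem.Str.isIn " " term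
  · simp only [entry_contrib, hsp, if_true]
    simp [List.foldl_fixed']
  · simp only [entry_contrib, hsp, Bool.false_eq_true, if_false]
    rw [foldl_count]
    simp only [zero_add]
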